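-- pv_equiv track=rewrite | github.com/qxl0/Leetcode-Python | JumpGame-V.py | maxJumps
-- ===== SOURCE A (Python) =====
-- from typing import List
--
-- def maxJumps(arr: List[int], d: int) -> int:
--     n = len(arr)
--     if n == 0:
--         return 0
--     mixedList = [(arr[i], i) for i in range(n)]
--     mixedList.sort()
--
--     globalMax = 0
--     dp = [1] * n
--     for i in range(n):
--         val, idx = mixedList[i]
--         j = idx + 1
--         while j < n and j <= idx + d and arr[j] < val:
--             dp[idx] = max(dp[idx], 1 + dp[j])
--             j += 1
--         j = idx - 1
--         while j >= 0 and j >= idx - d and arr[j] < val: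
--             dp[idx] = max(dp[idx], 1 + dp[j])
--             j -= 1
--         globalMax = max(globalMax, dp[idx])
--     return globalMax
-- ===== SOURCE B (Python) =====
-- from typing import List
--
-- def maxJumps(arr: List[int], d: int) -> int:
--     # top-down memoized DFS instead of A's sort-then-bottom-up DP
--     n = len(arr)
--     memo = {}
--
--     def dfs(i):
--         if i in memo:
--             return memo[i]
--         best = 1
--         j = i + 1
--         while j < n and j - i <= d and arr[j] < arr[i]:
--             best = max(best, 1 + dfs(j))
--             j += 1
--         j = i - 1
--         while j >= 0 and i - j <= d and arr[j] < arr[i]: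
--             best = max(best, 1 + dfs(j))
--             j -= 1
--         memo[i] = best
--         return best
--
--     best = 0
--     for i in range(n):
--         best = max(best, dfs(i))
--     return best
-- ===== Notes on version B (the rewrite author's own statement) =====
-- stated objective: alternative
-- what changed: A sorts the (value, index) pairs and fills the dp table bottom-up in value order; B drops the sort entirely and computes each chain length by a top-down depth-first recursion with a memo dictionary.
import Mathlib
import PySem

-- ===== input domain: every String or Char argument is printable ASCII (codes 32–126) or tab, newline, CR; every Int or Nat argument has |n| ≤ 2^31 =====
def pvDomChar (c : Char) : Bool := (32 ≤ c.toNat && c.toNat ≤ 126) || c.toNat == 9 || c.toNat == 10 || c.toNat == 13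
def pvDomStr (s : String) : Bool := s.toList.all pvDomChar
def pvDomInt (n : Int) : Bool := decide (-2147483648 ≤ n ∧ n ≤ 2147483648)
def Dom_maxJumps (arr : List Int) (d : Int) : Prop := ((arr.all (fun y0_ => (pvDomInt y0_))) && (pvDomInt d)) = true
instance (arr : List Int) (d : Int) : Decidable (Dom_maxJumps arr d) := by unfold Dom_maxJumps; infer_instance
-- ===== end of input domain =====

-- B replaces A's sort-then-bottom-up DP by a top-down memoized DFS (no sort, same exact values; objective: alternative algorithm).

-- ===== PORT A =====
-- the while loops, made total by a fuel argument (always called with enough fuel: the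
-- scan advances one index per step, so arr.length + 1 steps can never be exhausted)
def aUp (arr : List Int) (d val idx : Int) : Nat → Int → List Int → List Int
  | 0, _, dp => dp
  | fuel + 1, j, dp =>
    if j < (arr.length : Int) ∧ j ≤ idx + d ∧ PySem.List.pyGetD arr j 0 < val then
      aUp arr d val idx fuel (j+1)
        (PySem.List.pySetD dp idx (max (PySem.List.pyGetD dp idx 0) (1 + PySem.List.pyGetD dp j 0)))
    else dp

def aDown (arr : List Int) (d val idx : Int) : Nat → Int → List Int → List Int
  | 0, _, dp => dp
  | fuel + 1, j, dp =>
    if 0 ≤ j ∧ idx - d ≤ j ∧ PySem.List.pyGetD arr j 0 < val then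
      aDown arr d val idx fuel (j-1)
        (PySem.List.pySetD dp idx (max (PySem.List.pyGetD dp idx 0) (1 + PySem.List.pyGetD dp j 0)))
    else dp

def maxJumps (arr : List Int) (d : Int) : Int :=
  let n : Int := (arr.length : Int)
  if n = 0 then 0
  else
    let mixedList := (PySem.List.pyRange 0 n 1).map (fun i => (PySem.List.pyGetD arr i 0, i))
    let sortedL := PySem.List.sorted2 mixedList (fun p => p.1) (fun p => p.2)
    let res := (PySem.List.pyRange 0 n 1).foldl
      (fun (st : Int × List Int) i =>
        let p := PySem.List.pyGetD sortedL i (0, 0)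
        let dp1 := aUp arr d p.1 p.2 (arr.length + 1) (p.2 + 1) st.2
        let dp2 := aDown arr d p.1 p.2 (arr.length + 1) (p.2 - 1) dp1
        (max st.1 (PySem.List.pyGetD dp2 p.2 0), dp2))
      (0, List.replicate arr.length 1)
    res.1

-- ===== PORT B =====
-- the scans take the dfs as a function argument and their own fuel (arr.length + 1 can
-- never be exhausted); bDfs recurses structurally on its fuel
def bUp (arr : List Int) (d : Int) (dfsF : PySem.Dict Int Int → Int → Int × PySem.Dict Int Int) :
    Nat → Int → Int → Int → PySem.Dict Int Int → Int × PySem.Dict Int Int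
  | 0, _, _, best, memo => (best, memo)
  | sf + 1, i, j, best, memo =>
    if j < (arr.length : Int) ∧ j - i ≤ d ∧ PySem.List.pyGetD arr j 0 < PySem.List.pyGetD arr i 0 then
      let r := dfsF memo j
      bUp arr d dfsF sf i (j+1) (max best (1 + r.1)) r.2
    else (best, memo)

def bDown (arr : List Int) (d : Int) (dfsF : PySem.Dict Int Int → Int → Int × PySem.Dict Int Int) :
    Nat → Int → Int → Int → PySem.Dict Int Int → Int × PySem.Dict Int Int
  | 0, _, _, best, memo => (best, memo)
  | sf + 1, i, j, best, memo =>
    if 0 ≤ j ∧ i - j ≤ d ∧ PySem.List.pyGetD arr j 0 < PySem.List.pyGetD arr i 0 then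
      let r := dfsF memo j
      bDown arr d dfsF sf i (j-1) (max best (1 + r.1)) r.2
    else (best, memo)

def bDfs (arr : List Int) (d : Int) : Nat → PySem.Dict Int Int → Int → Int × PySem.Dict Int Int
  | 0, memo, _ => (0, memo)
  | fuel + 1, memo, i =>
    match memo.get? i with
    | some v => (v, memo)
    | none =>
      let r1 := bUp arr d (fun m j => bDfs arr d fuel m j) (arr.length + 1) i (i+1) 1 memo
      let r2 := bDown arr d (fun m j => bDfs arr d fuel m j) (arr.length + 1) i (i-1) r1.1 r1.2
      (r2.1, r2.2.insert i r2.1)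

def maxJumps_alt (arr : List Int) (d : Int) : Int :=
  let n : Int := (arr.length : Int)
  ((PySem.List.pyRange 0 n 1).foldl
    (fun (st : Int × PySem.Dict Int Int) i =>
      let r := bDfs arr d arr.length st.2 i
      (max st.1 r.1, r.2))
    (0, PySem.Dict.empty)).1

-- ===== PRECONDITION & SPEC =====
def Spec_maxJumps (arr : List Int) (d : Int) (out : Int) : Prop := out = maxJumps_alt arr d
instance (arr : List Int) (d : Int) (out : Int) : Decidable (Spec_maxJumps arr d out) := by unfold Spec_maxJumps; infer_instance

-- ===== CLAIM (what is proved, stated in full; the proofs are below) =====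
def Claim_equal_maxJumps : Prop := ∀ (arr : List Int) (d : Int), Dom_maxJumps arr d → Spec_maxJumps arr d (maxJumps arr d)

-- ===== LEMMAS AND PROOFS =====

-- the list of indices A's/B's upward (resp. downward) scan from i actually visits
def upList (arr : List Int) (d i : Int) : List Int :=
  (PySem.List.pyRange (i+1) (min (arr.length : Int) (i+d+1)) 1).takeWhile
    (fun j => decide (PySem.List.pyGetD arr j 0 < PySem.List.pyGetD arr i 0))

def downList (arr : List Int) (d i : Int) : List Int :=
  (PySem.List.pyRange (i-1) (max (-1) (i-d-1)) (-1)).takeWhile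
    (fun j => decide (PySem.List.pyGetD arr j 0 < PySem.List.pyGetD arr i 0))

def reach (arr : List Int) (d i : Int) : List Int := upList arr d i ++ downList arr d i

-- number of entries strictly smaller than arr[i]: the recursion measure of the Bellman DP
def mu (arr : List Int) (i : Int) : Nat :=
  arr.countP (fun x => decide (x < PySem.List.pyGetD arr i 0))

def dpF (arr : List Int) (d : Int) : Nat → Int → Int
  | 0, _ => 1
  | fuel + 1, i => (reach arr d i).foldl (fun a j => max a (1 + dpF arr d fuel j)) 1

def trueDp (arr : List Int) (d i : Int) : Int := dpF arr d (mu arr i + 1) i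

theorem mem_upList {arr : List Int} {d i j : Int} (h : j ∈ upList arr d i) :
    i + 1 ≤ j ∧ j < (arr.length : Int) ∧ j ≤ i + d ∧
      PySem.List.pyGetD arr j 0 < PySem.List.pyGetD arr i 0 := by
  unfold upList at h
  have hmem := (List.takeWhile_sublist _).mem h
  rw [PySem.List.mem_pyRange_one] at hmem
  have hpred := List.mem_takeWhile_imp h
  simp at hpred
  omega

theorem mem_downList {arr : List Int} {d i j : Int} (h : j ∈ downList arr d i) :
    0 ≤ j ∧ j ≤ i - 1 ∧ i - d ≤ j ∧
      PySem.List.pyGetD arr j 0 < PySem.List.pyGetD arr i 0 := by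
  unfold downList at h
  have hmem := (List.takeWhile_sublist _).mem h
  rw [PySem.List.mem_pyRange_neg_one] at hmem
  have hpred := List.mem_takeWhile_imp h
  simp at hpred
  omega

theorem mem_reach {arr : List Int} {d i j : Int} (h0 : 0 ≤ i) (hn : i < (arr.length : Int)) (h : j ∈ reach arr d i) :
    0 ≤ j ∧ j < (arr.length : Int) ∧
      PySem.List.pyGetD arr j 0 < PySem.List.pyGetD arr i 0 := by
  rcases List.mem_append.mp h with h' | h'
  · have := mem_upList h'
    exact ⟨by omega, by omega, this.2.2.2⟩
  · have := mem_downList h'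
    refine ⟨this.1, ?_, this.2.2.2⟩
    omega

theorem mu_lt {arr : List Int} {i j : Int} (h0 : 0 ≤ j) (hn : j < (arr.length : Int))
    (hv : PySem.List.pyGetD arr j 0 < PySem.List.pyGetD arr i 0) : mu arr j < mu arr i := by
  have hjmem : PySem.List.pyGetD arr j 0 ∈ arr :=
    PySem.List.pyGetD_mem arr 0 (by unfold PySem.Raise.InRange; omega)
  unfold mu
  set vj := PySem.List.pyGetD arr j 0 with hvj
  set vi := PySem.List.pyGetD arr i 0 with hvi
  clear_value vj vi
  clear hvj hvi h0 hn
  induction arr with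
  | nil => simp at hjmem
  | cons x xs ih =>
    rw [List.countP_cons, List.countP_cons]
    rcases List.mem_cons.mp hjmem with rfl | hx
    · have hmono : xs.countP (fun y => decide (y < vj)) ≤ xs.countP (fun y => decide (y < vi)) :=
        List.countP_mono_left (by intro y _ hy; simp at hy ⊢; omega)
      simp [show vj < vi from hv]
      omega
    · have := ih hx
      by_cases hxj : x < vj
      · simp [hxj, show x < vi by omega]; omega
      · simp [hxj]
        split <;> omega

theorem mu_lt_len {arr : List Int} {i : Int} (h0 : 0 ≤ i) (hn : i < (arr.length : Int)) :
    mu arr i < arr.length := by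
  have himem : PySem.List.pyGetD arr i 0 ∈ arr :=
    PySem.List.pyGetD_mem arr 0 (by unfold PySem.Raise.InRange; omega)
  unfold mu
  set v := PySem.List.pyGetD arr i 0 with hv
  clear_value v
  clear hv h0 hn
  induction arr with
  | nil => simp at himem
  | cons y ys ih =>
    rw [List.countP_cons, List.length_cons]
    rcases List.mem_cons.mp himem with rfl | hx
    · have := List.countP_le_length (l := ys) (p := fun x => decide (x < v))
      simp
      omega
    · have := ih hx
      split <;> omega

theorem dpF_congr (arr : List Int) (d : Int) :
    ∀ f1 f2 i, 0 ≤ i → i < (arr.length : Int) → mu arr i < f1 → mu arr i < f2 → dpF arr d f1 i = dpF arr d f2 i := by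
  intro f1
  induction f1 using Nat.strong_induction_on with
  | _ f1 ih =>
    intro f2 i h0 hn h1 h2
    match f1, f2 with
    | a + 1, b + 1 =>
      simp only [dpF]
      refine PySem.List.foldl_congr_mem _ _ _ _ ?_
      intro acc j hj
      have hr := mem_reach h0 hn hj
      have hmuj : mu arr j < mu arr i := mu_lt hr.1 hr.2.1 hr.2.2
      rw [ih a (by omega) b j hr.1 hr.2.1 (by omega) (by omega)]

theorem trueDp_bellman (arr : List Int) (d i : Int) (h0 : 0 ≤ i) (hn : i < (arr.length : Int)) :
    trueDp arr d i = (reach arr d i).foldl (fun a j => max a (1 + trueDp arr d j)) 1 := by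
  unfold trueDp
  simp only [dpF]
  refine PySem.List.foldl_congr_mem _ _ _ _ ?_
  intro acc j hj
  have hr := mem_reach h0 hn hj
  have hmuj : mu arr j < mu arr i := mu_lt hr.1 hr.2.1 hr.2.2
  rw [dpF_congr arr d (mu arr i) (mu arr j + 1) j hr.1 hr.2.1 (by omega) (by omega)]
  rfl

-- list read/write helpers in Int-index form
theorem getD_setD (xs : List Int) (i m v w : Int) (h0 : 0 ≤ i) (h : i < (xs.length : Int)) (hm : 0 ≤ m) :
    PySem.List.pyGetD (PySem.List.pySetD xs i v) m w = if m = i then v else PySem.List.pyGetD xs m w := by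
  rw [PySem.List.pySetD_of_nonneg xs v h0, PySem.List.pyGetD_of_nonneg _ w hm,
    PySem.List.pyGetD_of_nonneg xs w hm]
  rcases eq_or_ne m i with rfl | hne
  · simp [List.getD_eq_getElem?_getD, show m.toNat < xs.length by omega]
  · have hne' : i.toNat ≠ m.toNat := by omega
    simp [hne, List.getD_eq_getElem?_getD, List.getElem?_set_ne hne']

theorem setD_setD (xs : List Int) (i a b : Int) (h0 : 0 ≤ i) :
    PySem.List.pySetD (PySem.List.pySetD xs i a) i b = PySem.List.pySetD xs i b := by
  rw [PySem.List.pySetD_of_nonneg xs a h0, PySem.List.pySetD_of_nonneg _ b h0,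
    PySem.List.pySetD_of_nonneg xs b h0, List.set_set]

theorem setD_getD_self (xs : List Int) (i : Int) (h0 : 0 ≤ i) (h : i < (xs.length : Int)) :
    PySem.List.pySetD xs i (PySem.List.pyGetD xs i 0) = xs := by
  rw [PySem.List.pySetD_of_nonneg xs _ h0, PySem.List.pyGetD_eq_getElem _ _ h0 (by simpa using h)]
  exact List.set_getElem_self (by omega)

-- A's while loops compute a fold over the takeWhile list, writing only at idx
theorem aUp_eq (arr : List Int) (d val idx : Int) :
    ∀ (fuel : Nat) (j : Int) (dp : List Int), 0 ≤ idx → idx < (dp.length : Int) → idx < j →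
      ((arr.length : Int) - j).toNat ≤ fuel →
      aUp arr d val idx fuel j dp =
        PySem.List.pySetD dp idx
          (((PySem.List.pyRange j (min (arr.length : Int) (idx+d+1)) 1).takeWhile
              (fun j' => decide (PySem.List.pyGetD arr j' 0 < val))).foldl
            (fun a j' => max a (1 + PySem.List.pyGetD dp j' 0)) (PySem.List.pyGetD dp idx 0)) := by
  intro fuel
  induction fuel with
  | zero =>
    intro j dp h0 hlen hij hf
    rw [PySem.List.pyRange_one_eq_nil (by omega)]
    simp only [aUp, List.takeWhile_nil, List.foldl_nil]
    rw [setD_getD_self dp idx h0 hlen]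
  | succ fuel ih =>
    intro j dp h0 hlen hij hf
    rw [aUp]
    by_cases h : j < (arr.length : Int) ∧ j ≤ idx + d ∧ PySem.List.pyGetD arr j 0 < val
    · rw [if_pos h]
      set dp' := PySem.List.pySetD dp idx (max (PySem.List.pyGetD dp idx 0) (1 + PySem.List.pyGetD dp j 0)) with hdp'
      have hlen' : (dp'.length : Int) = (dp.length : Int) := by
        rw [hdp', PySem.List.length_pySetD]
      rw [ih (j+1) dp' h0 (by omega) (by omega) (by omega)]
      have hcons : PySem.List.pyRange j (min (arr.length : Int) (idx+d+1)) 1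
          = j :: PySem.List.pyRange (j+1) (min (arr.length : Int) (idx+d+1)) 1 :=
        PySem.List.pyRange_one_cons (by omega)
      rw [hcons, List.takeWhile_cons_of_pos (by simp; omega)]
      rw [List.foldl_cons]
      have hidx' : PySem.List.pyGetD dp' idx 0 = max (PySem.List.pyGetD dp idx 0) (1 + PySem.List.pyGetD dp j 0) := by
        rw [hdp', getD_setD dp idx idx _ 0 h0 hlen h0]
        simp
      have hreads : ∀ (a : Int), ∀ j' ∈ (PySem.List.pyRange (j+1) (min (arr.length : Int) (idx+d+1)) 1).takeWhile
          (fun j' => decide (PySem.List.pyGetD arr j' 0 < val)),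
          max a (1 + PySem.List.pyGetD dp' j' 0) = max a (1 + PySem.List.pyGetD dp j' 0) := by
        intro a j' hj'
        have hmem := (List.takeWhile_sublist _).mem hj'
        rw [PySem.List.mem_pyRange_one] at hmem
        rw [hdp', getD_setD dp idx j' _ 0 h0 hlen (by omega)]
        rw [if_neg (by omega)]
      rw [PySem.List.foldl_congr_mem _ _ _ _ hreads, hidx', hdp',
        setD_setD dp idx _ _ h0]
    · rw [if_neg h]
      have hnil : (PySem.List.pyRange j (min (arr.length : Int) (idx+d+1)) 1).takeWhile
          (fun j' => decide (PySem.List.pyGetD arr j' 0 < val)) = [] := by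
        by_cases hb : min (arr.length : Int) (idx+d+1) ≤ j
        · rw [PySem.List.pyRange_one_eq_nil hb]; rfl
        · rw [PySem.List.pyRange_one_cons (by omega), List.takeWhile_cons_of_neg (by simp; omega)]
      rw [hnil, List.foldl_nil, setD_getD_self dp idx h0 hlen]

theorem aDown_eq (arr : List Int) (d val idx : Int) :
    ∀ (fuel : Nat) (j : Int) (dp : List Int), 0 ≤ idx → idx < (dp.length : Int) → j < idx →
      (j + 1).toNat ≤ fuel →
      aDown arr d val idx fuel j dp =
        PySem.List.pySetD dp idx
          (((PySem.List.pyRange j (max (-1) (idx-d-1)) (-1)).takeWhile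
              (fun j' => decide (PySem.List.pyGetD arr j' 0 < val))).foldl
            (fun a j' => max a (1 + PySem.List.pyGetD dp j' 0)) (PySem.List.pyGetD dp idx 0)) := by
  intro fuel
  induction fuel with
  | zero =>
    intro j dp h0 hlen hij hf
    rw [PySem.List.pyRange_neg_one_eq_nil (by omega)]
    simp only [aDown, List.takeWhile_nil, List.foldl_nil]
    rw [setD_getD_self dp idx h0 hlen]
  | succ fuel ih =>
    intro j dp h0 hlen hij hf
    rw [aDown]
    by_cases h : 0 ≤ j ∧ idx - d ≤ j ∧ PySem.List.pyGetD arr j 0 < val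
    · rw [if_pos h]
      set dp' := PySem.List.pySetD dp idx (max (PySem.List.pyGetD dp idx 0) (1 + PySem.List.pyGetD dp j 0)) with hdp'
      have hlen' : (dp'.length : Int) = (dp.length : Int) := by
        rw [hdp', PySem.List.length_pySetD]
      rw [ih (j-1) dp' h0 (by omega) (by omega) (by omega)]
      have hcons : PySem.List.pyRange j (max (-1) (idx-d-1)) (-1)
          = j :: PySem.List.pyRange (j-1) (max (-1) (idx-d-1)) (-1) :=
        PySem.List.pyRange_neg_one_cons (by omega)
      rw [hcons, List.takeWhile_cons_of_pos (by simp; omega)]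
      rw [List.foldl_cons]
      have hidx' : PySem.List.pyGetD dp' idx 0 = max (PySem.List.pyGetD dp idx 0) (1 + PySem.List.pyGetD dp j 0) := by
        rw [hdp', getD_setD dp idx idx _ 0 h0 hlen h0]
        simp
      have hreads : ∀ (a : Int), ∀ j' ∈ (PySem.List.pyRange (j-1) (max (-1) (idx-d-1)) (-1)).takeWhile
          (fun j' => decide (PySem.List.pyGetD arr j' 0 < val)),
          max a (1 + PySem.List.pyGetD dp' j' 0) = max a (1 + PySem.List.pyGetD dp j' 0) := by
        intro a j' hj'
        have hmem := (List.takeWhile_sublist _).mem hj'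
        rw [PySem.List.mem_pyRange_neg_one] at hmem
        rw [hdp', getD_setD dp idx j' _ 0 h0 hlen (by omega)]
        rw [if_neg (by omega)]
      rw [PySem.List.foldl_congr_mem _ _ _ _ hreads, hidx', hdp',
        setD_setD dp idx _ _ h0]
    · rw [if_neg h]
      have hnil : (PySem.List.pyRange j (max (-1) (idx-d-1)) (-1)).takeWhile
          (fun j' => decide (PySem.List.pyGetD arr j' 0 < val)) = [] := by
        by_cases hb : j ≤ max (-1) (idx-d-1)
        · rw [PySem.List.pyRange_neg_one_eq_nil hb]; rfl
        · rw [PySem.List.pyRange_neg_one_cons (by omega), List.takeWhile_cons_of_neg (by simp; omega)]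
      rw [hnil, List.foldl_nil, setD_getD_self dp idx h0 hlen]

-- the strict lexicographic comparison Python's tuple sort uses
def lexB (p q : Int × Int) : Bool :=
  decide (p.1 < q.1) || (!decide (q.1 < p.1) && decide (p.2 < q.2))

theorem lexB_trans {a b c : Int × Int} (h1 : lexB a b = true) (h2 : lexB b c = true) : lexB a c = true := by
  unfold lexB at *
  simp only [Bool.or_eq_true, Bool.and_eq_true, decide_eq_true_eq, Bool.not_eq_eq_eq_not,
    Bool.not_true, decide_eq_false_iff_not] at *
  omega

theorem lexB_total {a b : Int × Int} (h : a ≠ b) : lexB a b = true ∨ lexB b a = true := by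
  have hne : a.1 ≠ b.1 ∨ a.2 ≠ b.2 := by
    by_contra hc
    rw [not_or, not_not, not_not] at hc
    exact h (Prod.ext hc.1 hc.2)
  unfold lexB
  simp only [Bool.or_eq_true, Bool.and_eq_true, decide_eq_true_eq, Bool.not_eq_eq_eq_not,
    Bool.not_true, decide_eq_false_iff_not]
  omega

theorem pairwise_insertBy {α : Type} (B : α → α → Bool)
    (htrans : ∀ a b c, B a b = true → B b c = true → B a c = true)
    (x : α) (acc : List α) (hacc : acc.Pairwise (fun a b => B a b = true))
    (htot : ∀ y ∈ acc, B x y = true ∨ B y x = true) :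
    (PySem.List.insertBy B x acc).Pairwise (fun a b => B a b = true) := by
  induction acc with
  | nil => simp [PySem.List.insertBy]
  | cons y ys ih =>
    rw [List.pairwise_cons] at hacc
    by_cases hxy : B x y = true
    · rw [show PySem.List.insertBy B x (y :: ys) = x :: y :: ys by simp [PySem.List.insertBy, hxy]]
      refine List.Pairwise.cons ?_ (List.Pairwise.cons hacc.1 hacc.2)
      intro z hz
      rcases List.mem_cons.mp hz with rfl | hz'
      · exact hxy
      · exact htrans _ _ _ hxy (hacc.1 z hz')
    · rw [show PySem.List.insertBy B x (y :: ys) = y :: PySem.List.insertBy B x ys by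
        simp [PySem.List.insertBy, hxy]]
      refine List.Pairwise.cons ?_ (ih hacc.2 (fun z hz => htot z (List.mem_cons_of_mem y hz)))
      intro z hz
      rcases (PySem.List.mem_insertBy B x z ys).mp hz with rfl | hz'
      · rcases htot y List.mem_cons_self with h' | h'
        · exact absurd h' hxy
        · exact h'
      · exact hacc.1 z hz' 

theorem pairwise_foldl_insertBy {α : Type} [DecidableEq α] (B : α → α → Bool)
    (htrans : ∀ a b c, B a b = true → B b c = true → B a c = true)
    (htot : ∀ a b : α, a ≠ b → B a b = true ∨ B b a = true) :
    ∀ (xs acc : List α), acc.Pairwise (fun a b => B a b = true) →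
      (∀ y ∈ acc, y ∉ xs) → xs.Nodup →
      (xs.foldl (fun acc x => PySem.List.insertBy B x acc) acc).Pairwise (fun a b => B a b = true) := by
  intro xs
  induction xs with
  | nil => intro acc hacc _ _; simpa using hacc
  | cons x xs ih =>
    intro acc hacc hdisj hnd
    rw [List.foldl_cons]
    refine ih _ ?_ ?_ (List.Nodup.of_cons hnd)
    · refine pairwise_insertBy B htrans x acc hacc ?_
      intro y hy
      have hne : x ≠ y := fun he => hdisj y hy (he ▸ List.mem_cons_self)
      exact htot x y hne
    · intro y hy hyx
      rcases (PySem.List.mem_insertBy B x y acc).mp hy with rfl | hy'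
      · exact (List.nodup_cons.mp hnd).1 hyx
      · exact hdisj y hy' (List.mem_cons_of_mem x hyx)

theorem sorted2_eq_foldl (xs : List (Int × Int)) :
    PySem.List.sorted2 xs (fun p => p.1) (fun p => p.2) =
      xs.foldl (fun acc x => PySem.List.insertBy lexB x acc) [] := rfl

-- B-side: a memo is faithful when every stored value is the true dp value
def Faithful (arr : List Int) (d : Int) (m : PySem.Dict Int Int) : Prop :=
  ∀ k v, m.get? k = some v → v = trueDp arr d k

theorem bUp_eq (arr : List Int) (d : Int)
    (dfsF : PySem.Dict Int Int → Int → Int × PySem.Dict Int Int) (fuel : Nat)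
    (Hdfs : ∀ i' m', 0 ≤ i' → i' < (arr.length : Int) → Faithful arr d m' → mu arr i' < fuel →
      (dfsF m' i').1 = trueDp arr d i' ∧ Faithful arr d (dfsF m' i').2)
    (i : Int) (hi0 : 0 ≤ i) (hmu : mu arr i ≤ fuel) :
    ∀ (sf : Nat) (j best : Int) memo, ((arr.length : Int) - j).toNat ≤ sf → i < j →
      Faithful arr d memo →
      (bUp arr d dfsF sf i j best memo).1 =
        ((PySem.List.pyRange j (min (arr.length : Int) (i+d+1)) 1).takeWhile
            (fun j' => decide (PySem.List.pyGetD arr j' 0 < PySem.List.pyGetD arr i 0))).foldl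
          (fun a j' => max a (1 + trueDp arr d j')) best
      ∧ Faithful arr d (bUp arr d dfsF sf i j best memo).2 := by
  intro sf
  induction sf with
  | zero =>
    intro j best memo hk hij hm
    rw [PySem.List.pyRange_one_eq_nil (by omega)]
    exact ⟨rfl, hm⟩
  | succ sf ih =>
    intro j best memo hk hij hm
    rw [bUp]
    by_cases hg : j < (arr.length : Int) ∧ j - i ≤ d ∧ PySem.List.pyGetD arr j 0 < PySem.List.pyGetD arr i 0
    · rw [if_pos hg]
      have hdfs := Hdfs j memo (by omega) hg.1 hm (by
        have := mu_lt (arr := arr) (i := i) (j := j) (by omega) hg.1 hg.2.2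
        omega)
      have hrec := ih (j+1) (max best (1 + (dfsF memo j).1)) (dfsF memo j).2
        (by omega) (by omega) hdfs.2
      rw [PySem.List.pyRange_one_cons (by omega), List.takeWhile_cons_of_pos (by simp [hg.2.2])]
      rw [List.foldl_cons]
      refine ⟨?_, hrec.2⟩
      rw [hrec.1, hdfs.1]
    · rw [if_neg hg]
      have hnil : (PySem.List.pyRange j (min (arr.length : Int) (i+d+1)) 1).takeWhile
          (fun j' => decide (PySem.List.pyGetD arr j' 0 < PySem.List.pyGetD arr i 0)) = [] := by
        by_cases hb : min (arr.length : Int) (i+d+1) ≤ j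
        · rw [PySem.List.pyRange_one_eq_nil hb]; rfl
        · rw [PySem.List.pyRange_one_cons (by omega), List.takeWhile_cons_of_neg (by simp; omega)]
      rw [hnil]
      exact ⟨rfl, hm⟩

theorem bDown_eq (arr : List Int) (d : Int)
    (dfsF : PySem.Dict Int Int → Int → Int × PySem.Dict Int Int) (fuel : Nat)
    (Hdfs : ∀ i' m', 0 ≤ i' → i' < (arr.length : Int) → Faithful arr d m' → mu arr i' < fuel →
      (dfsF m' i').1 = trueDp arr d i' ∧ Faithful arr d (dfsF m' i').2)
    (i : Int) (hin : i < (arr.length : Int)) (hmu : mu arr i ≤ fuel) :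
    ∀ (sf : Nat) (j best : Int) memo, (j + 1).toNat ≤ sf → j < i →
      Faithful arr d memo →
      (bDown arr d dfsF sf i j best memo).1 =
        ((PySem.List.pyRange j (max (-1) (i-d-1)) (-1)).takeWhile
            (fun j' => decide (PySem.List.pyGetD arr j' 0 < PySem.List.pyGetD arr i 0))).foldl
          (fun a j' => max a (1 + trueDp arr d j')) best
      ∧ Faithful arr d (bDown arr d dfsF sf i j best memo).2 := by
  intro sf
  induction sf with
  | zero =>
    intro j best memo hk hij hm
    rw [PySem.List.pyRange_neg_one_eq_nil (by omega)]
    exact ⟨rfl, hm⟩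
  | succ sf ih =>
    intro j best memo hk hij hm
    rw [bDown]
    by_cases hg : 0 ≤ j ∧ i - j ≤ d ∧ PySem.List.pyGetD arr j 0 < PySem.List.pyGetD arr i 0
    · rw [if_pos hg]
      have hdfs := Hdfs j memo hg.1 (by omega) hm (by
        have := mu_lt (arr := arr) (i := i) (j := j) hg.1 (by omega) hg.2.2
        omega)
      have hrec := ih (j-1) (max best (1 + (dfsF memo j).1)) (dfsF memo j).2
        (by omega) (by omega) hdfs.2
      rw [PySem.List.pyRange_neg_one_cons (by omega), List.takeWhile_cons_of_pos (by simp [hg.2.2])]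
      rw [List.foldl_cons]
      refine ⟨?_, hrec.2⟩
      rw [hrec.1, hdfs.1]
    · rw [if_neg hg]
      have hnil : (PySem.List.pyRange j (max (-1) (i-d-1)) (-1)).takeWhile
          (fun j' => decide (PySem.List.pyGetD arr j' 0 < PySem.List.pyGetD arr i 0)) = [] := by
        by_cases hb : j ≤ max (-1) (i-d-1)
        · rw [PySem.List.pyRange_neg_one_eq_nil hb]; rfl
        · rw [PySem.List.pyRange_neg_one_cons (by omega), List.takeWhile_cons_of_neg (by simp; omega)]
      rw [hnil]
      exact ⟨rfl, hm⟩

theorem bDfs_correct (arr : List Int) (d : Int) :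
    ∀ fuel i memo, 0 ≤ i → i < (arr.length : Int) → Faithful arr d memo → mu arr i < fuel →
      (bDfs arr d fuel memo i).1 = trueDp arr d i ∧ Faithful arr d (bDfs arr d fuel memo i).2 := by
  intro fuel
  induction fuel using Nat.strong_induction_on with
  | _ fuel ihf =>
    intro i memo hi0 hin hm hmu
    match fuel, hmu with
    | f + 1, hmu =>
      have Hdfs : ∀ i' m', 0 ≤ i' → i' < (arr.length : Int) → Faithful arr d m' → mu arr i' < f →
          ((fun m j => bDfs arr d f m j) m' i').1 = trueDp arr d i'
            ∧ Faithful arr d ((fun m j => bDfs arr d f m j) m' i').2 :=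
        fun i' m' a b c e => ihf f (by omega) i' m' a b c e
      rw [bDfs]
      cases hget : memo.get? i with
      | some v =>
        exact ⟨hm i v hget, by simpa [hget] using hm⟩
      | none =>
        have hup := bUp_eq arr d (fun m j => bDfs arr d f m j) f Hdfs i hi0 (by omega)
          (arr.length + 1) (i+1) 1 memo (by omega) (by omega) hm
        have hdown := bDown_eq arr d (fun m j => bDfs arr d f m j) f Hdfs i hin (by omega)
          (arr.length + 1) (i-1)
          (bUp arr d (fun m j => bDfs arr d f m j) (arr.length + 1) i (i+1) 1 memo).1
          (bUp arr d (fun m j => bDfs arr d f m j) (arr.length + 1) i (i+1) 1 memo).2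
          (by omega) (by omega) hup.2
        have hval : (bDown arr d (fun m j => bDfs arr d f m j) (arr.length + 1) i (i-1)
            (bUp arr d (fun m j => bDfs arr d f m j) (arr.length + 1) i (i+1) 1 memo).1
            (bUp arr d (fun m j => bDfs arr d f m j) (arr.length + 1) i (i+1) 1 memo).2).1
            = trueDp arr d i := by
          rw [hdown.1, hup.1]
          rw [trueDp_bellman arr d i hi0 hin]
          unfold reach upList downList
          rw [List.foldl_append]
        refine ⟨hval, ?_⟩
        intro k v hkv
        rw [PySem.Dict.get?_insert] at hkv
        split at hkv
        · rename_i hki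
          injection hkv with hv
          subst hki
          rw [← hv]
          exact hval
        · exact hdown.2 k v hkv

theorem altFold (arr : List Int) (d : Int) :
    ∀ (L : List Int) (g : Int) (memo : PySem.Dict Int Int), Faithful arr d memo →
      (∀ i ∈ L, 0 ≤ i ∧ i < (arr.length : Int)) →
      (L.foldl (fun (st : Int × PySem.Dict Int Int) i =>
          (max st.1 (bDfs arr d arr.length st.2 i).1, (bDfs arr d arr.length st.2 i).2)) (g, memo)).1
        = L.foldl (fun a i => max a (trueDp arr d i)) g := by
  intro L
  induction L with
  | nil => intro g memo _ _; rfl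
  | cons i L ih =>
    intro g memo hm hb
    have hbi := hb i List.mem_cons_self
    have hc := bDfs_correct arr d arr.length i memo hbi.1 hbi.2 hm
      (mu_lt_len hbi.1 hbi.2)
    rw [List.foldl_cons, List.foldl_cons, ← hc.1]
    exact ih _ _ hc.2 (fun j hj => hb j (List.mem_cons_of_mem i hj))

theorem alt_eq_fold (arr : List Int) (d : Int) :
    maxJumps_alt arr d =
      (PySem.List.pyRange 0 (arr.length : Int) 1).foldl (fun a i => max a (trueDp arr d i)) 0 := by
  unfold maxJumps_alt
  refine altFold arr d _ 0 PySem.Dict.empty ?_ ?_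
  · intro k v hkv
    simp [PySem.Dict.get?_empty] at hkv
  · intro i hi
    rw [PySem.List.mem_pyRange_one] at hi
    exact hi

theorem aMain (arr : List Int) (d : Int) (S : List (Int × Int))
    (hperm : S.Perm ((PySem.List.pyRange 0 (arr.length : Int) 1).map
      (fun i => (PySem.List.pyGetD arr i 0, i))))
    (hPW : S.Pairwise (fun a b => lexB a b = true)) :
    ∀ todo done (g : Int) (dp : List Int), S = done ++ todo → dp.length = arr.length →
      (∀ j : Int, 0 ≤ j → j < (arr.length : Int) →
        ((j ∈ done.map Prod.snd → PySem.List.pyGetD dp j 0 = trueDp arr d j) ∧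
         (j ∉ done.map Prod.snd → PySem.List.pyGetD dp j 0 = 1))) →
      (todo.foldl (fun (st : Int × List Int) (p : Int × Int) =>
          (max st.1 (PySem.List.pyGetD
              (aDown arr d p.1 p.2 (arr.length + 1) (p.2-1)
                (aUp arr d p.1 p.2 (arr.length + 1) (p.2+1) st.2)) p.2 0),
            aDown arr d p.1 p.2 (arr.length + 1) (p.2-1)
              (aUp arr d p.1 p.2 (arr.length + 1) (p.2+1) st.2))) (g, dp)).1
        = todo.foldl (fun a p => max a (trueDp arr d p.2)) g := by
  have hsnd : (S.map Prod.snd).Nodup := by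
    have h1 := hperm.map Prod.snd
    have h2 : ((PySem.List.pyRange 0 (arr.length : Int) 1).map
        (fun i => (PySem.List.pyGetD arr i 0, i))).map Prod.snd
        = PySem.List.pyRange 0 (arr.length : Int) 1 := by
      rw [List.map_map]
      exact List.map_id _
    rw [h2] at h1
    exact h1.symm.nodup (PySem.List.nodup_pyRange_one 0 _)
  intro todo
  induction todo with
  | nil => intro done g dp _ _ _; rfl
  | cons p todo ihp =>
    intro done g dp hS hlen hinv
    -- facts about p
    have hpS : p ∈ S := by rw [hS]; exact List.mem_append_right _ List.mem_cons_self
    have hpM := hperm.mem_iff.mp hpS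
    obtain ⟨i0, hi0, heq⟩ := List.mem_map.mp hpM
    rw [PySem.List.mem_pyRange_one] at hi0
    have hval : p.1 = PySem.List.pyGetD arr p.2 0 := by rw [← heq]
    have hb0 : 0 ≤ p.2 := by rw [← heq]; exact hi0.1
    have hbn : p.2 < (arr.length : Int) := by rw [← heq]; exact hi0.2
    -- p.2 is unprocessed
    have hidx : p.2 ∉ done.map Prod.snd := by
      intro hcon
      have h1 := hsnd
      rw [hS, List.map_append, List.nodup_append] at h1
      exact h1.2.2 p.2 hcon p.2 List.mem_cons_self rfl
    -- every reachable index is already processed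
    have hreach : ∀ j ∈ reach arr d p.2, j ∈ done.map Prod.snd := by
      intro j hj
      have hr := mem_reach hb0 hbn hj
      have hqM : (PySem.List.pyGetD arr j 0, j) ∈
          ((PySem.List.pyRange 0 (arr.length : Int) 1).map
            (fun i => (PySem.List.pyGetD arr i 0, i))) :=
        List.mem_map.mpr ⟨j, PySem.List.mem_pyRange_one.mpr ⟨hr.1, hr.2.1⟩, rfl⟩
      have hqS : (PySem.List.pyGetD arr j 0, j) ∈ S := hperm.mem_iff.mpr hqM
      rw [hS] at hqS
      rcases List.mem_append.mp hqS with hq | hq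
      · exact List.mem_map.mpr ⟨_, hq, rfl⟩
      · rcases List.mem_cons.mp hq with hq' | hq'
        · exfalso
          have : PySem.List.pyGetD arr j 0 = p.1 := by rw [← hq']
          omega
        · exfalso
          have hpw : lexB p (PySem.List.pyGetD arr j 0, j) = true := by
            have h1 := hPW
            rw [hS] at h1
            have h2 := h1.sublist (List.sublist_append_right done _)
            exact (List.pairwise_cons.mp h2).1 _ hq'
          unfold lexB at hpw
          simp only [Bool.or_eq_true, Bool.and_eq_true, decide_eq_true_eq,
            Bool.not_eq_eq_eq_not, Bool.not_true, decide_eq_false_iff_not] at hpw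
          omega
    -- compute the step
    have hdpidx : PySem.List.pyGetD dp p.2 0 = 1 := (hinv p.2 hb0 hbn).2 hidx
    have hlenI : p.2 < (dp.length : Int) := by omega
    rw [List.foldl_cons, List.foldl_cons]
    rw [aUp_eq arr d p.1 p.2 (arr.length + 1) (p.2+1) dp hb0 hlenI (by omega) (by omega)]
    set U := ((PySem.List.pyRange (p.2+1) (min (arr.length : Int) (p.2+d+1)) 1).takeWhile
        (fun j' => decide (PySem.List.pyGetD arr j' 0 < p.1))).foldl
      (fun a j' => max a (1 + PySem.List.pyGetD dp j' 0)) (PySem.List.pyGetD dp p.2 0) with hU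
    have hlen1 : ((PySem.List.pySetD dp p.2 U).length : Int) = (dp.length : Int) := by
      rw [PySem.List.length_pySetD]
    rw [aDown_eq arr d p.1 p.2 (arr.length + 1) (p.2-1) _ hb0 (by omega) (by omega) (by omega)]
    -- identify the takeWhile lists with upList/downList
    have hupL : (PySem.List.pyRange (p.2+1) (min (arr.length : Int) (p.2+d+1)) 1).takeWhile
        (fun j' => decide (PySem.List.pyGetD arr j' 0 < p.1)) = upList arr d p.2 := by
      rw [hval]; rfl
    have hdownL : (PySem.List.pyRange (p.2-1) (max (-1) (p.2-d-1)) (-1)).takeWhile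
        (fun j' => decide (PySem.List.pyGetD arr j' 0 < p.1)) = downList arr d p.2 := by
      rw [hval]; rfl
    -- the up fold over trueDp
    have hUval : U = (upList arr d p.2).foldl (fun a j' => max a (1 + trueDp arr d j')) 1 := by
      rw [hU, hdpidx, hupL]
      refine PySem.List.foldl_congr_mem _ _ _ _ ?_
      intro a j' hj'
      have hjr : j' ∈ reach arr d p.2 := List.mem_append_left _ hj'
      have hr' := mem_reach hb0 hbn hjr
      rw [(hinv j' hr'.1 hr'.2.1).1 (hreach j' hjr)]
    -- reads in the down fold see the original dp except at p.2
    have hgetU : PySem.List.pyGetD (PySem.List.pySetD dp p.2 U) p.2 0 = U := by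
      rw [getD_setD dp p.2 p.2 U 0 hb0 hlenI hb0]; simp
    have hD : ((PySem.List.pyRange (p.2-1) (max (-1) (p.2-d-1)) (-1)).takeWhile
        (fun j' => decide (PySem.List.pyGetD arr j' 0 < p.1))).foldl
          (fun a j' => max a (1 + PySem.List.pyGetD (PySem.List.pySetD dp p.2 U) j' 0))
          (PySem.List.pyGetD (PySem.List.pySetD dp p.2 U) p.2 0)
        = trueDp arr d p.2 := by
      rw [hgetU, hdownL]
      have hcongr : ∀ (a : Int), ∀ j' ∈ downList arr d p.2,
          max a (1 + PySem.List.pyGetD (PySem.List.pySetD dp p.2 U) j' 0)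
            = max a (1 + trueDp arr d j') := by
        intro a j' hj'
        have hjr : j' ∈ reach arr d p.2 := List.mem_append_right _ hj'
        have hr' := mem_reach hb0 hbn hjr
        have hne := mem_downList hj'
        rw [getD_setD dp p.2 j' U 0 hb0 hlenI hr'.1, if_neg (by omega),
          (hinv j' hr'.1 hr'.2.1).1 (hreach j' hjr)]
      rw [PySem.List.foldl_congr_mem _ _ _ _ hcongr, hUval,
        trueDp_bellman arr d p.2 hb0 hbn]
      unfold reach
      rw [List.foldl_append]
    rw [hD, setD_setD dp p.2 U _ hb0]
    have hget2 : PySem.List.pyGetD (PySem.List.pySetD dp p.2 (trueDp arr d p.2)) p.2 0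
        = trueDp arr d p.2 := by
      rw [getD_setD dp p.2 p.2 _ 0 hb0 hlenI hb0]; simp
    rw [hget2]
    -- apply the induction hypothesis with done ++ [p]
    refine ihp (done ++ [p]) (max g (trueDp arr d p.2)) _ ?_ ?_ ?_
    · rw [hS, List.append_assoc]; rfl
    · rw [PySem.List.length_pySetD]; exact hlen
    · intro j hj0 hjn
      constructor
      · intro hjmem
        rw [List.map_append, List.mem_append] at hjmem
        rw [getD_setD dp p.2 j _ 0 hb0 hlenI hj0]
        rcases hjmem with hjd | hjp
        · by_cases hje : j = p.2
          · rw [if_pos hje, hje]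
          · rw [if_neg hje]; exact (hinv j hj0 hjn).1 hjd
        · simp at hjp
          rw [if_pos hjp, hjp]
      · intro hjmem
        rw [List.map_append, List.mem_append] at hjmem
        have hjd : j ∉ done.map Prod.snd := fun hc => hjmem (Or.inl hc)
        have hjne : j ≠ p.2 := fun hje => hjmem (Or.inr (by simp [hje]))
        rw [getD_setD dp p.2 j _ 0 hb0 hlenI hj0, if_neg hjne]
        exact (hinv j hj0 hjn).2 hjd

theorem a_eq_fold (arr : List Int) (d : Int) :
    maxJumps arr d =
      (PySem.List.pyRange 0 (arr.length : Int) 1).foldl (fun a i => max a (trueDp arr d i)) 0 := by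
  by_cases hn0 : (arr.length : Int) = 0
  · simp only [maxJumps, if_pos hn0]
    rw [PySem.List.pyRange_one_eq_nil (by omega)]
    rfl
  · simp only [maxJumps]
    rw [if_neg hn0]
    set S := PySem.List.sorted2
      ((PySem.List.pyRange 0 (arr.length : Int) 1).map (fun i => (PySem.List.pyGetD arr i 0, i)))
      (fun p => p.1) (fun p => p.2) with hSdef
    have hperm : S.Perm ((PySem.List.pyRange 0 (arr.length : Int) 1).map
        (fun i => (PySem.List.pyGetD arr i 0, i))) :=
      PySem.List.sorted2_perm _ _ _ _
    have hlenS : (S.length : Int) = (arr.length : Int) := by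
      rw [hperm.length_eq, List.length_map, PySem.List.length_pyRange_one]
      omega
    have hPW : S.Pairwise (fun a b => lexB a b = true) := by
      rw [hSdef, sorted2_eq_foldl]
      refine pairwise_foldl_insertBy lexB (fun a b c => lexB_trans) (fun a b => lexB_total) _ [] ?_ ?_ ?_
      · exact List.Pairwise.nil
      · intro y hy; cases hy
      · refine List.Nodup.map ?_ (PySem.List.nodup_pyRange_one 0 _)
        intro a b hab
        simpa using congrArg Prod.snd hab
    have hbridge := PySem.List.foldl_pyRange_zero_pyGetD' S ((0 : Int), (0 : Int))
      (fun (st : Int × List Int) (p : Int × Int) =>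
        (max st.1 (PySem.List.pyGetD
            (aDown arr d p.1 p.2 (arr.length + 1) (p.2-1)
              (aUp arr d p.1 p.2 (arr.length + 1) (p.2+1) st.2)) p.2 0),
          aDown arr d p.1 p.2 (arr.length + 1) (p.2-1)
            (aUp arr d p.1 p.2 (arr.length + 1) (p.2+1) st.2)))
      ((0 : Int), List.replicate arr.length 1)
    rw [show PySem.List.pyRange 0 (arr.length : Int) 1
        = PySem.List.pyRange 0 (S.length : Int) 1 by rw [hlenS]]
    refine Eq.trans (congrArg Prod.fst hbridge) ?_
    have hmain := aMain arr d S hperm hPW S [] 0 (List.replicate arr.length 1) rfl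
      (List.length_replicate) ?_
    · rw [hmain]
      have hfm : S.foldl (fun a p => max a (trueDp arr d p.2)) 0
          = (S.map Prod.snd).foldl (fun a i => max a (trueDp arr d i)) 0 := by
        rw [List.foldl_map]
      rw [hfm]
      have hps : (S.map Prod.snd).Perm (PySem.List.pyRange 0 (arr.length : Int) 1) := by
        have h1 := hperm.map Prod.snd
        have h2 : ((PySem.List.pyRange 0 (arr.length : Int) 1).map
            (fun i => (PySem.List.pyGetD arr i 0, i))).map Prod.snd
            = PySem.List.pyRange 0 (arr.length : Int) 1 := by
          rw [List.map_map]
          exact List.map_id _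
        rw [h2] at h1
        exact h1
      rw [← hlenS] at hps
      haveI : RightCommutative (fun (a : Int) (i : Int) => max a (trueDp arr d i)) :=
        ⟨fun b a1 a2 => max_right_comm _ _ _⟩
      exact hps.foldl_eq 0
    · intro j hj0 hjn
      refine ⟨?_, ?_⟩
      · intro hjm; simp at hjm
      · intro _
        rw [PySem.List.pyGetD_eq_getElem _ 0 hj0 (by rw [List.length_replicate]; omega)]
        exact List.getElem_replicate _

-- ===== VERDICT (by name: the statement is the Claim_ definition above) =====
theorem maxJumps_spec : Claim_equal_maxJumps := by
  intro arr d _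
  unfold Spec_maxJumps
  rw [a_eq_fold, alt_eq_fold]
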